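-- pv_equiv track=rewrite | github.com/gridvisi/Python_workspace | algorithm_portal/abc_ericlee_solve/6 kyu There was an Old Lady who Swallowed a Fly.py | old_lady_swallows
-- ===== SOURCE A (Python) =====
-- predators = {
--     "fly": "spider",
--     "spider": "bird",
--     "bird": "cat",
--     "cat": "dog",
--     "dog": "goat",
--     "goat": "cow",
--     "cow": "horse"
-- }
--
-- def old_lady_swallows(animals: list) -> list:
--     alive = []
--     for animal in animals:
--         alive.append(animal)
--         alive_set = set(alive)
--         alive = [prey for prey in alive if predators.get(prey) not in alive_set]
--         if animal == "horse": break
--     return alive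
-- ===== SOURCE B (Python) =====
-- predators = {
--     "fly": "spider",
--     "spider": "bird",
--     "bird": "cat",
--     "cat": "dog",
--     "dog": "goat",
--     "goat": "cow",
--     "cow": "horse"
-- }
--
-- prey_of = {v: k for k, v in predators.items()}
--
-- def old_lady_swallows(animals: list) -> list:
--     alive = []
--     counts = {}
--     for animal in animals:
--         eats = prey_of.get(animal)
--         if eats is not None and counts.get(eats, 0) > 0:
--             alive = [x for x in alive if x != eats]
--             counts[eats] = 0
--         if counts.get(predators.get(animal), 0) == 0:
--             alive.append(animal)
--             counts[animal] = counts.get(animal, 0) + 1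
--         if animal == "horse":
--             break
--     return alive
-- ===== Notes on version B (the rewrite author's own statement) =====
-- stated objective: faster
-- what changed: B replaces A's per-animal full rescan (rebuilding set(alive) and filtering the entire alive list on every animal) with an incremental count table: predator/prey presence becomes a dict-count lookup and the alive list is filtered only when an eat event actually removes something.
import Mathlib
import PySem

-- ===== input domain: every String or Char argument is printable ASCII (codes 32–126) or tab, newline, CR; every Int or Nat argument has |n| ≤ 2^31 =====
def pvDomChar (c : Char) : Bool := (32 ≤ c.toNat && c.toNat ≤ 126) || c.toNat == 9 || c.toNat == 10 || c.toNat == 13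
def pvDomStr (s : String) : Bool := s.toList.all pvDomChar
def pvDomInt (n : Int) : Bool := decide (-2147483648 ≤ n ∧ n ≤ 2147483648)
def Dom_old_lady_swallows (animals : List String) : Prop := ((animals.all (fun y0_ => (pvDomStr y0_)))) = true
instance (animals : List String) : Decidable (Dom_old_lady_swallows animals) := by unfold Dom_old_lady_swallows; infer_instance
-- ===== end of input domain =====

-- B replaces A's per-animal full rescan (rebuilding set(alive) and filtering the whole list at every step) by an
-- incremental count table: membership tests are dict lookups and the list is filtered only when an
-- actual eat event occurs (objective: faster).

-- ===== PORT A =====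
def pvPredators : PySem.Dict String String :=
  PySem.Dict.mk [("fly","spider"),("spider","bird"),("bird","cat"),("cat","dog"),
                 ("dog","goat"),("goat","cow"),("cow","horse")]

-- 'predators.get(prey) not in alive_set' (None is never in a set of strings)
def pvKeep (aliveSet : PySem.Set String) (prey : String) : Bool :=
  match pvPredators.get? prey with
  | some p => !(PySem.Set.contains aliveSet p)
  | none => true

def pvLoopA (alive : List String) : List String → List String
  | [] => alive
  | animal :: rest =>
    let alive1 := alive ++ [animal]
    let aliveSet := PySem.Set.ofList alive1
    let alive2 := alive1.filter (pvKeep aliveSet)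
    if animal == "horse" then alive2 else pvLoopA alive2 rest

def old_lady_swallows (animals : List String) : List String := pvLoopA [] animals

-- ===== PORT B =====
-- prey_of = {v: k for k, v in predators.items()}
def pvPreyOf : PySem.Dict String String :=
  (pvPredators.items).foldl (fun d p => d.insert p.2 p.1) PySem.Dict.empty

-- the 'eats' branch: remove the prey species (if any is alive) from alive and zero its count
def pvEatStep (alive : List String) (counts : PySem.Dict String Int) (animal : String) :
    List String × PySem.Dict String Int :=
  match pvPreyOf.get? animal with
  | some eats =>
      if counts.getD eats 0 > 0 then (alive.filter (fun x => x != eats), counts.insert eats 0)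
      else (alive, counts)
  | none => (alive, counts)

-- counts.get(predators.get(animal), 0)  (a missing predator key yields 0)
def pvPredCount (counts : PySem.Dict String Int) (animal : String) : Int :=
  match pvPredators.get? animal with
  | some p => counts.getD p 0
  | none => 0

def pvAddStep (alive : List String) (counts : PySem.Dict String Int) (animal : String) :
    List String × PySem.Dict String Int :=
  if pvPredCount counts animal == 0 then
    (alive ++ [animal], counts.insert animal (counts.getD animal 0 + 1))
  else (alive, counts)

def pvLoopB (alive : List String) (counts : PySem.Dict String Int) : List String → List String
  | [] => alive
  | animal :: rest =>
    let s1 := pvEatStep alive counts animal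
    let s2 := pvAddStep s1.1 s1.2 animal
    if animal == "horse" then s2.1 else pvLoopB s2.1 s2.2 rest

def old_lady_swallows_alt (animals : List String) : List String :=
  pvLoopB [] PySem.Dict.empty animals

-- ===== PRECONDITION & SPEC =====
def Spec_old_lady_swallows (animals : List String) (out : List String) : Prop := out = old_lady_swallows_alt animals
instance (animals : List String) (out : List String) : Decidable (Spec_old_lady_swallows animals out) := by unfold Spec_old_lady_swallows; infer_instance

-- ===== CLAIM (what is proved, stated in full; the proofs are below) =====
def Claim_equal_old_lady_swallows : Prop := ∀ (animals : List String), Dom_old_lady_swallows animals → Spec_old_lady_swallows animals (old_lady_swallows animals)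

-- ===== LEMMAS AND PROOFS =====

-- the predator pairs as a plain list
def pvPairs : List (String × String) :=
  [("fly","spider"),("spider","bird"),("bird","cat"),("cat","dog"),
   ("dog","goat"),("goat","cow"),("cow","horse")]

lemma mem_pairs_iff (x a : String) : (x, a) ∈ pvPairs ↔
    (x="fly"∧a="spider") ∨ (x="spider"∧a="bird") ∨ (x="bird"∧a="cat") ∨ (x="cat"∧a="dog") ∨
    (x="dog"∧a="goat") ∨ (x="goat"∧a="cow") ∨ (x="cow"∧a="horse") := by
  simp [pvPairs, Prod.mk.injEq]

lemma nil_get? (y : String) : (PySem.Dict.mk ([] : List (String × String))).get? y = none := rfl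

lemma pred_iff (x a : String) : pvPredators.get? x = some a ↔ (x, a) ∈ pvPairs := by
  rw [mem_pairs_iff]
  constructor
  · intro h
    simp only [pvPredators, PySem.Dict.get?_mk_cons] at h
    split_ifs at h <;> simp_all [nil_get?]
  · intro h
    rcases h with ⟨h1,h2⟩|⟨h1,h2⟩|⟨h1,h2⟩|⟨h1,h2⟩|⟨h1,h2⟩|⟨h1,h2⟩|⟨h1,h2⟩ <;>
      subst h1 <;> subst h2 <;> rfl

lemma prey_iff (a x : String) : pvPreyOf.get? a = some x ↔ (x, a) ∈ pvPairs := by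
  have hE : pvPreyOf = PySem.Dict.mk
      [("spider","fly"),("bird","spider"),("cat","bird"),("dog","cat"),
       ("goat","dog"),("cow","goat"),("horse","cow")] := by rfl
  rw [hE, mem_pairs_iff]
  constructor
  · intro h
    simp only [PySem.Dict.get?_mk_cons] at h
    split_ifs at h <;> simp_all [nil_get?]
  · intro h
    rcases h with ⟨h1,h2⟩|⟨h1,h2⟩|⟨h1,h2⟩|⟨h1,h2⟩|⟨h1,h2⟩|⟨h1,h2⟩|⟨h1,h2⟩ <;>
      subst h1 <;> subst h2 <;> rfl

lemma pairs_ne (x a : String) (h : (x, a) ∈ pvPairs) : x ≠ a := by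
  rw [mem_pairs_iff] at h
  rcases h with ⟨h1,h2⟩|⟨h1,h2⟩|⟨h1,h2⟩|⟨h1,h2⟩|⟨h1,h2⟩|⟨h1,h2⟩|⟨h1,h2⟩ <;>
    subst h1 <;> subst h2 <;> decide

lemma pairs_no_cycle (x a : String) (h1 : (x, a) ∈ pvPairs) (h2 : (a, x) ∈ pvPairs) : False := by
  rw [mem_pairs_iff] at h1 h2
  rcases h1 with ⟨h1,e1⟩|⟨h1,e1⟩|⟨h1,e1⟩|⟨h1,e1⟩|⟨h1,e1⟩|⟨h1,e1⟩|⟨h1,e1⟩ <;> subst h1 <;> subst e1 <;> simp_all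

lemma pairs_inj (x y a : String) (h1 : (x, a) ∈ pvPairs) (h2 : (y, a) ∈ pvPairs) : x = y := by
  rw [mem_pairs_iff] at h1 h2
  rcases h1 with ⟨h1,e1⟩|⟨h1,e1⟩|⟨h1,e1⟩|⟨h1,e1⟩|⟨h1,e1⟩|⟨h1,e1⟩|⟨h1,e1⟩ <;> subst h1 <;> subst e1 <;>
  rcases h2 with ⟨h2,e2⟩|⟨h2,e2⟩|⟨h2,e2⟩|⟨h2,e2⟩|⟨h2,e2⟩|⟨h2,e2⟩|⟨h2,e2⟩ <;> subst h2 <;> simp_all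

-- the coupling invariant between A's alive list and B's (alive, counts) state
def pvInv (alive : List String) (counts : PySem.Dict String Int) : Prop :=
  (∀ s : String, counts.getD s 0 = (alive.count s : Int)) ∧
  (∀ x ∈ alive, ∀ p, pvPredators.get? x = some p → p ∉ alive)

lemma keep_iff (alive1 : List String) (x : String) :
    pvKeep (PySem.Set.ofList alive1) x = true ↔
      ∀ p, pvPredators.get? x = some p → p ∉ alive1 := by
  cases h : pvPredators.get? x with
  | none => simp [pvKeep, h]
  | some p => simp [pvKeep, h, PySem.Set.mem_ofList]

lemma count_pos_iff (l : List String) (s : String) : (0 : Int) < (l.count s : Int) ↔ s ∈ l := by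
  constructor
  · intro h; exact List.count_pos_iff.mp (by exact_mod_cast h)
  · intro h; exact_mod_cast List.count_pos_iff.mpr h

-- pred/prey coupling facts specialised to get?
lemma pred_of_prey (a x : String) (h : pvPreyOf.get? a = some x) : pvPredators.get? x = some a :=
  (pred_iff _ _).mpr ((prey_iff _ _).mp h)

lemma prey_of_pred (x a : String) (h : pvPredators.get? x = some a) : pvPreyOf.get? a = some x :=
  (prey_iff _ _).mpr ((pred_iff _ _).mp h)

-- A's filter, restricted to the previously alive animals, is exactly B's eat step
lemma filter_old (alive : List String) (counts : PySem.Dict String Int) (animal : String)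
    (hInv : pvInv alive counts) :
    alive.filter (pvKeep (PySem.Set.ofList (alive ++ [animal]))) = (pvEatStep alive counts animal).1 := by
  obtain ⟨h1, h2⟩ := hInv
  cases he : pvPreyOf.get? animal with
  | none =>
    simp only [pvEatStep, he]
    apply List.filter_eq_self.mpr
    intro x hx
    rw [keep_iff]
    intro p hp
    simp only [List.mem_append, List.mem_singleton]
    rintro (hpa | rfl)
    · exact h2 x hx p hp hpa
    · exact absurd (prey_of_pred x p hp) (by simp [he])
  | some eats =>
    by_cases hc : counts.getD eats 0 > 0
    · simp only [pvEatStep, he, if_pos hc]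
      apply List.filter_congr
      intro x hx
      cases hp : pvPredators.get? x with
      | none =>
        have hxe : x ≠ eats := by
          intro h; subst h
          rw [pred_of_prey animal x he] at hp; cases hp
        simp [pvKeep, hp, bne, hxe]
      | some p =>
        have hpna : p ∉ alive := h2 x hx p hp
        by_cases hxe : x = eats
        · subst hxe
          have : p = animal := by
            rw [pred_of_prey animal x he] at hp; injection hp with hp; exact hp.symm
          subst this
          simp [pvKeep, hp, PySem.Set.mem_ofList]
        · have hpa : p ≠ animal := by
            intro h; subst h
            exact hxe (pairs_inj x eats p ((pred_iff _ _).mp hp) ((prey_iff _ _).mp he))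
          have : ¬ p ∈ alive ++ [animal] := by
            simp only [List.mem_append, List.mem_singleton]
            rintro (h | h); exact hpna h; exact hpa h
          simp [pvKeep, hp, bne, hxe, PySem.Set.mem_ofList, this]
    · simp only [pvEatStep, he, if_neg hc]
      apply List.filter_eq_self.mpr
      intro x hx
      rw [keep_iff]
      intro p hp
      simp only [List.mem_append, List.mem_singleton]
      rintro (hpa | rfl)
      · exact h2 x hx p hp hpa
      · have hxe : x = eats := pairs_inj x eats p ((pred_iff _ _).mp hp) ((prey_iff _ _).mp he)
        exact hc ((h1 eats).symm ▸ (count_pos_iff alive eats).mpr (hxe ▸ hx))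

-- A keeps the newly swallowed animal iff B's predator-count test passes
lemma keep_self (alive : List String) (counts : PySem.Dict String Int) (animal : String)
    (hInv : pvInv alive counts) :
    pvKeep (PySem.Set.ofList (alive ++ [animal])) animal
      = (pvPredCount (pvEatStep alive counts animal).2 animal == 0) := by
  obtain ⟨h1, h2⟩ := hInv
  cases hp : pvPredators.get? animal with
  | none =>
    have hL : pvKeep (PySem.Set.ofList (alive ++ [animal])) animal = true := by simp [pvKeep, hp]
    have hR : pvPredCount (pvEatStep alive counts animal).2 animal = 0 := by
      simp [pvPredCount, hp]
    rw [hL, hR]; rfl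
  | some p =>
    have hpa : p ≠ animal := (pairs_ne animal p ((pred_iff _ _).mp hp)).symm
    have hgd : (pvEatStep alive counts animal).2.getD p 0 = counts.getD p 0 := by
      cases he : pvPreyOf.get? animal with
      | none => simp [pvEatStep, he]
      | some eats =>
        have hpe : p ≠ eats := by
          intro h; subst h
          exact pairs_no_cycle animal p ((pred_iff _ _).mp hp) ((prey_iff _ _).mp he)
        simp only [pvEatStep, he]
        split
        · rw [PySem.Dict.getD_insert, if_neg hpe]
        · rfl
    have hrhs : pvPredCount (pvEatStep alive counts animal).2 animal = (alive.count p : Int) := by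
      simp only [pvPredCount, hp, hgd, h1 p]
    rw [hrhs]
    by_cases hm : p ∈ alive
    · have hmem : p ∈ alive ++ [animal] := List.mem_append_left _ hm
      have hcnt : alive.count p ≠ 0 := by
        intro h; exact absurd hm (List.count_eq_zero.mp h)
      have : ((alive.count p : Int) == 0) = false := by
        rw [beq_eq_false_iff_ne]; exact_mod_cast hcnt
      rw [this]
      simp [pvKeep, hp, PySem.Set.mem_ofList, hmem]
    · have hmem : ¬ p ∈ alive ++ [animal] := by
        simp only [List.mem_append, List.mem_singleton]
        rintro (h | h); exact hm h; exact hpa h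
      have hcnt : alive.count p = 0 := List.count_eq_zero.mpr hm
      have : ((alive.count p : Int) == 0) = true := by rw [beq_iff_eq]; exact_mod_cast hcnt
      rw [this]
      simp [pvKeep, hp, PySem.Set.mem_ofList, hmem]

-- the count table tracks multiplicities through the eat step …
lemma eat_count (alive : List String) (counts : PySem.Dict String Int) (animal : String)
    (h1 : ∀ s : String, counts.getD s 0 = (alive.count s : Int)) :
    ∀ s : String, (pvEatStep alive counts animal).2.getD s 0
      = (((pvEatStep alive counts animal).1.count s : Int)) := by
  intro s
  cases he : pvPreyOf.get? animal with
  | none => simp only [pvEatStep, he]; exact h1 s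
  | some eats =>
    simp only [pvEatStep, he]
    split
    · by_cases hs : s = eats
      · rw [PySem.Dict.getD_insert, if_pos hs]
        rw [List.count_eq_zero.mpr (by simp [List.mem_filter, hs])]
        rfl
      · rw [PySem.Dict.getD_insert, if_neg hs, h1 s]
        congr 1
        rw [List.count_filter]
        simp [bne, hs]
    · exact h1 s

-- … and through the add step
lemma add_count (alive : List String) (counts : PySem.Dict String Int) (animal : String)
    (h1 : ∀ s : String, counts.getD s 0 = (alive.count s : Int)) :
    ∀ s : String, (pvAddStep alive counts animal).2.getD s 0
      = (((pvAddStep alive counts animal).1.count s : Int)) := by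
  intro s
  simp only [pvAddStep]
  split
  · by_cases hs : s = animal
    · subst hs
      rw [PySem.Dict.getD_insert, if_pos rfl, h1 s, List.count_append]
      simp
    · rw [PySem.Dict.getD_insert, if_neg hs, h1 s, List.count_append]
      have : [animal].count s = 0 := by
        rw [List.count_eq_zero]; simp; exact fun h => hs h
      rw [this]; simp
  · exact h1 s

-- THE STEP LEMMA: one iteration of A equals one iteration of B, and the invariant is preserved
lemma step_eq (alive : List String) (counts : PySem.Dict String Int) (animal : String)
    (hInv : pvInv alive counts) :
    (alive ++ [animal]).filter (pvKeep (PySem.Set.ofList (alive ++ [animal])))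
      = (pvAddStep (pvEatStep alive counts animal).1 (pvEatStep alive counts animal).2 animal).1
    ∧ pvInv ((alive ++ [animal]).filter (pvKeep (PySem.Set.ofList (alive ++ [animal]))))
        (pvAddStep (pvEatStep alive counts animal).1 (pvEatStep alive counts animal).2 animal).2 := by
  have heq : (alive ++ [animal]).filter (pvKeep (PySem.Set.ofList (alive ++ [animal])))
      = (pvAddStep (pvEatStep alive counts animal).1 (pvEatStep alive counts animal).2 animal).1 := by
    rw [List.filter_append, filter_old alive counts animal hInv]
    simp only [pvAddStep, ← keep_self alive counts animal hInv]
    cases hk : pvKeep (PySem.Set.ofList (alive ++ [animal])) animal <;> simp [hk]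
  refine ⟨heq, ?_, ?_⟩
  · intro s
    rw [heq]
    exact add_count _ _ animal (eat_count alive counts animal hInv.1) s
  · intro x hx p hp hp2
    have hkeep := (List.mem_filter.mp hx).2
    rw [keep_iff] at hkeep
    exact hkeep p hp (List.mem_of_mem_filter hp2)

lemma loop_eq (l : List String) : ∀ (alive : List String) (counts : PySem.Dict String Int),
    pvInv alive counts → pvLoopA alive l = pvLoopB alive counts l := by
  induction l with
  | nil => intro alive counts _; rfl
  | cons animal rest ih =>
    intro alive counts hInv
    obtain ⟨heq, hInv'⟩ := step_eq alive counts animal hInv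
    rw [pvLoopA, pvLoopB]
    by_cases hh : animal = "horse"
    · subst hh
      simp only [beq_self_eq_true, if_true]
      exact heq
    · simp only [beq_iff_eq, hh, if_false]
      rw [ih _ _ hInv', heq]

-- ===== VERDICT (by name: the statement is the Claim_ definition above) =====
theorem old_lady_swallows_spec : Claim_equal_old_lady_swallows := by
  intro animals _
  show old_lady_swallows animals = old_lady_swallows_alt animals
  apply loop_eq
  constructor
  · intro s; simp [PySem.Dict.getD_empty]
  · intro x hx; simp at hx
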